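-- pv_equiv track=rewrite | github.com/MortezaCham/count_odd_sum_sublists | count_odd_sum_sublists.py | count_odd_sum_sublists
-- ===== SOURCE A (Python) =====
-- def count_odd_sum_sublists(items):
--     #creating a variable for counting sublists with odd sum
--     odd_sums = 0
--     #chosing each element of items for checking sum of it with other elements
--     for i in range(len(items)):
--         #creating a variable for saving sums of each sublists
--         pre_sum = 0
--         #chosing next elements of items for creating sub lists and calculating sums
--         for j in range(i, len(items)):
--             #calculating sum of sublists
--             pre_sum += items[j]
--             #checking if sum is odd or not
--             if pre_sum % 2 == 1:
--                 #if sum is odd we count it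
--                 odd_sums += 1
--
--     return odd_sums
-- ===== SOURCE B (Python) =====
-- def count_odd_sum_sublists(items):
--     # Prefix-parity counting: a contiguous sublist has odd sum iff the prefix
--     # sums at its ends have different parities.  One pass, O(n).
--     even, odd = 1, 0      # parities of prefix sums seen so far (empty prefix even)
--     parity = 0
--     total = 0
--     for x in items:
--         parity = (parity + x) % 2
--         if parity:
--             total += even
--             odd += 1
--         else:
--             total += odd
--             even += 1
--     return total
-- ===== Notes on version B (the rewrite author's own statement) =====
-- stated objective: faster
-- what changed: Replaced A's O(n^2) double loop over all contiguous sublists by a single pass that tracks the parity of the running prefix sum and counts even/odd prefix sums, since a sublist has odd sum iff its two bounding prefix sums differ in parity.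
import Mathlib
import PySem

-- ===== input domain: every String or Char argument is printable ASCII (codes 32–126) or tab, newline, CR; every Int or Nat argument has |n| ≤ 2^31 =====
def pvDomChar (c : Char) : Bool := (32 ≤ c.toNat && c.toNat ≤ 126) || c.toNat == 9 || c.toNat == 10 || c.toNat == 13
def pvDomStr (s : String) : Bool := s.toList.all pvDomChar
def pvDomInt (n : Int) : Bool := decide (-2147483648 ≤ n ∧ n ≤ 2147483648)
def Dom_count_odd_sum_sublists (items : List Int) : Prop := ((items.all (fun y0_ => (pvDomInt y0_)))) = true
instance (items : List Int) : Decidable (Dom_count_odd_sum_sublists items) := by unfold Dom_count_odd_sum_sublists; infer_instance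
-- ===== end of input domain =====

-- B replaces A's quadratic all-sublists scan by one O(n) pass counting prefix-sum parities (objective: faster, asymptotic).

-- ===== PORT A =====
-- inner-loop body: state (pre_sum, odd_sums), v = items[j]
def stepA (st : Int × Int) (v : Int) : Int × Int :=
  let pre := st.1 + v
  (pre, if PySem.Int.mod pre 2 == 1 then st.2 + 1 else st.2)

def count_odd_sum_sublists (items : List Int) : Int :=
  (PySem.List.pyRange 0 (PySem.List.len items) 1).foldl
    (fun odd_sums i =>
      ((PySem.List.pyRange i (PySem.List.len items) 1).foldl
        (fun st j => stepA st (PySem.List.pyGetD items j 0))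
        (0, odd_sums)).2)
    0

-- ===== PORT B =====
-- loop body: state (even, odd, parity, total)
def stepB (st : Int × Int × Int × Int) (x : Int) : Int × Int × Int × Int :=
  let p := PySem.Int.mod (st.2.2.1 + x) 2
  if p = 0 then (st.1 + 1, st.2.1, p, st.2.2.2 + st.2.1)
  else (st.1, st.2.1 + 1, p, st.2.2.2 + st.1)

def count_odd_sum_sublists_alt (items : List Int) : Int :=
  (items.foldl stepB (1, 0, 0, 0)).2.2.2

-- ===== PRECONDITION & SPEC =====
def Spec_count_odd_sum_sublists (items : List Int) (out : Int) : Prop := out = count_odd_sum_sublists_alt items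
instance (items : List Int) (out : Int) : Decidable (Spec_count_odd_sum_sublists items out) := by unfold Spec_count_odd_sum_sublists; infer_instance

-- ===== CLAIM (what is proved, stated in full; the proofs are below) =====
def Claim_equal_count_odd_sum_sublists : Prop := ∀ (items : List Int), Dom_count_odd_sum_sublists items → Spec_count_odd_sum_sublists items (count_odd_sum_sublists items)

-- ===== LEMMAS AND PROOFS =====

-- number of nonempty prefixes of l making the running sum s odd (A's inner count)
def cntOdd (s : Int) : List Int → Int
  | [] => 0
  | x :: xs => (if PySem.Int.mod (s + x) 2 == 1 then 1 else 0) + cntOdd (s + x) xs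

-- counts of nonempty prefixes with odd / even sum, p the starting parity (0 or 1)
def ocnt (p : Int) : List Int → Int
  | [] => 0
  | x :: xs => (if PySem.Int.mod (p + x) 2 = 0 then 0 else 1) + ocnt (PySem.Int.mod (p + x) 2) xs

def ecnt (p : Int) : List Int → Int
  | [] => 0
  | x :: xs => (if PySem.Int.mod (p + x) 2 = 0 then 1 else 0) + ecnt (PySem.Int.mod (p + x) 2) xs

def endPar (p : Int) : List Int → Int
  | [] => p
  | x :: xs => endPar (PySem.Int.mod (p + x) 2) xs

-- A's per-start count, summed over suffixes
def Asum : List Int → Int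
  | [] => 0
  | x :: xs => cntOdd 0 (x :: xs) + Asum xs

lemma mod2 (a : Int) : PySem.Int.mod a 2 = a % 2 :=
  PySem.Int.mod_eq_emod_of_pos (by omega)

lemma mod2_add_left (s x : Int) :
    PySem.Int.mod (PySem.Int.mod s 2 + x) 2 = PySem.Int.mod (s + x) 2 := by
  simp only [mod2]; omega

lemma innerFold (l : List Int) : ∀ s c,
    (l.foldl stepA (s, c)).2 = c + cntOdd s l := by
  induction l with
  | nil => intro s c; simp [cntOdd]
  | cons x xs ih =>
    intro s c
    simp only [List.foldl_cons, stepA, cntOdd, ih]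
    by_cases h : PySem.Int.mod (s + x) 2 = 1 <;>
      simp only [beq_iff_eq, h, if_pos, if_neg, not_false_iff] <;> ring_nf

lemma cntOdd_parity (l : List Int) : ∀ s, cntOdd s l = ocnt (PySem.Int.mod s 2) l := by
  induction l with
  | nil => intro s; simp [cntOdd, ocnt]
  | cons x xs ih =>
    intro s
    simp only [cntOdd, ocnt, mod2_add_left, ih (s + x)]
    congr 1
    rcases PySem.Int.mod_two_eq (s + x) with h | h <;> rw [h] <;> norm_num

lemma swap_cnt (l : List Int) : ocnt 1 l = ecnt 0 l ∧ ecnt 1 l = ocnt 0 l := by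
  induction l with
  | nil => simp [ocnt, ecnt]
  | cons x xs ih =>
    simp only [ocnt, ecnt]
    rcases PySem.Int.mod_two_eq (0 + x) with hx | hx
    · have hb : PySem.Int.mod (1 + x) 2 = 1 := by
        simp only [mod2] at hx ⊢; omega
      rw [hx, hb]; norm_num [ih.1, ih.2]
    · have hb : PySem.Int.mod (1 + x) 2 = 0 := by
        simp only [mod2] at hx ⊢; omega
      rw [hx, hb]; norm_num [ih.1, ih.2]

lemma Asum_closed (l : List Int) : Asum l = (1 + ecnt 0 l) * ocnt 0 l := by
  induction l with
  | nil => simp [Asum, ecnt, ocnt]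
  | cons x xs ih =>
    have hc : cntOdd 0 (x :: xs) = ocnt 0 (x :: xs) := by
      simpa using cntOdd_parity (x :: xs) 0
    simp only [Asum, hc, ih, ocnt, ecnt]
    rcases PySem.Int.mod_two_eq (0 + x) with hx | hx
    · rw [hx]; norm_num; try ring
    · rw [hx]; norm_num [(swap_cnt xs).1, (swap_cnt xs).2]; try ring

lemma bFold (l : List Int) : ∀ e o p,
    l.foldl stepB (e, o, p, e * o) =
      (e + ecnt p l, o + ocnt p l, endPar p l, (e + ecnt p l) * (o + ocnt p l)) := by
  induction l with
  | nil => intro e o p; simp [ecnt, ocnt, endPar]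
  | cons x xs ih =>
    intro e o p
    simp only [List.foldl_cons, stepB, ecnt, ocnt, endPar]
    rcases PySem.Int.mod_two_eq (p + x) with hq | hq <;> rw [hq]
    · rw [if_pos rfl]
      rw [show e * o + o = (e + 1) * o by ring, ih (e + 1) o 0,
        show (if (0 : Int) = 0 then (1 : Int) else 0) = 1 by norm_num,
        show (if (0 : Int) = 0 then (0 : Int) else 1) = 0 by norm_num]
      refine congrArg₂ Prod.mk ?_ (congrArg₂ Prod.mk ?_ (congrArg₂ Prod.mk ?_ ?_)) <;> ring
    · rw [if_neg (by norm_num)]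
      rw [show e * o + e = e * (o + 1) by ring, ih e (o + 1) 1,
        show (if (1 : Int) = 0 then (1 : Int) else 0) = 0 by norm_num,
        show (if (1 : Int) = 0 then (0 : Int) else 1) = 1 by norm_num]
      refine congrArg₂ Prod.mk ?_ (congrArg₂ Prod.mk ?_ (congrArg₂ Prod.mk ?_ ?_)) <;> ring

lemma alt_closed (l : List Int) :
    count_odd_sum_sublists_alt l = (1 + ecnt 0 l) * ocnt 0 l := by
  unfold count_odd_sum_sublists_alt
  rw [show ((1, 0, 0, 0) : Int × Int × Int × Int) = (1, 0, 0, 1 * 0) by norm_num,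
    bFold l 1 0 0]
  ring

lemma range_sum_drop (l : List Int) :
    ((List.range l.length).map (fun k => cntOdd 0 (l.drop k))).sum = Asum l := by
  induction l with
  | nil => simp [Asum]
  | cons x xs ih =>
    simp only [List.length_cons]
    rw [List.range_succ_eq_map]
    simp only [List.map_cons, List.map_map, List.sum_cons, List.drop_zero, Asum,
      Function.comp_def, List.drop_succ_cons]
    rw [ih]

lemma a_eq_Asum (items : List Int) : count_odd_sum_sublists items = Asum items := by
  unfold count_odd_sum_sublists
  have hinner : ∀ (c i : Int), 0 ≤ i →
      ((PySem.List.pyRange i (PySem.List.len items) 1).foldl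
        (fun st j => stepA st (PySem.List.pyGetD items j 0)) (0, c)).2
      = c + cntOdd 0 (items.drop i.toNat) := by
    intro c i hi
    rw [PySem.List.foldl_pyRange_pyGetD items 0 stepA ((0 : Int), c) hi, innerFold]
  have hcong := PySem.List.foldl_congr_mem'
    (PySem.List.pyRange 0 (PySem.List.len items) 1)
    (fun odd_sums i =>
      ((PySem.List.pyRange i (PySem.List.len items) 1).foldl
        (fun st j => stepA st (PySem.List.pyGetD items j 0)) (0, odd_sums)).2)
    (fun c i => c + cntOdd 0 (items.drop i.toNat))
    0
    (by
      intro i hi c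
      exact hinner c i (by have := PySem.List.mem_pyRange_one.mp hi; omega))
  rw [hcong, PySem.List.foldl_add, PySem.List.pyRange_one]
  simp only [List.map_map, Function.comp_def, zero_add, Int.toNat_natCast, sub_zero,
    PySem.List.len_eq]
  rw [range_sum_drop]

-- ===== VERDICT (by name: the statement is the Claim_ definition above) =====
theorem count_odd_sum_sublists_spec : Claim_equal_count_odd_sum_sublists := by
  intro items _
  unfold Spec_count_odd_sum_sublists
  rw [a_eq_Asum, Asum_closed, alt_closed]
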